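-- pv_equiv track=rewrite | github.com/bthornton191/adams_vscode | adams-cmd-lsp/adams_cmd_lsp/schema.py | _match_token
-- ===== SOURCE A (Python) =====
-- def _match_token(token, children):
--     """Match a single token against sibling children.
--
--     Returns the canonical name on match, None on no-match or ambiguity.
--     """
--     token_lower = token.lower()
--
--     # Exact match takes priority
--     for name in children:
--         if name.lower() == token_lower:
--             return name
--
--     # Prefix match — must be unambiguous and long enough
--     matches = []
--     for name, node_data in children.items():
--         min_prefix = node_data.get("min_prefix", len(name))
--         if len(token_lower) >= min_prefix and name.lower().startswith(token_lower):
--             matches.append(name)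
--
--     if len(matches) == 1:
--         return matches[0]
--
--     return None  # 0 matches or ambiguous
-- ===== SOURCE B (Python) =====
-- def _match_token(token, children):
--     """Match a single token against sibling children.
--
--     Single pass: return the first exact case-insensitive match immediately
--     (exact match bypasses min_prefix); otherwise collect valid prefix matches
--     and return the unique one, or None.
--     """
--     token_lower = token.lower()
--     matches = []
--     for name, node_data in children.items():
--         if name.lower() == token_lower:
--             return name
--         if len(token_lower) >= node_data.get("min_prefix", len(name)) and name.lower().startswith(token_lower):
--             matches.append(name)
--     return matches[0] if len(matches) == 1 else None
-- ===== Notes on version B (the rewrite author's own statement) =====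
-- stated objective: simpler
-- what changed: The two separate scans (one for an exact match, one collecting prefix matches) are fused into a single loop with an early return on the first exact match and an inline prefix-match accumulator.
import Mathlib
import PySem

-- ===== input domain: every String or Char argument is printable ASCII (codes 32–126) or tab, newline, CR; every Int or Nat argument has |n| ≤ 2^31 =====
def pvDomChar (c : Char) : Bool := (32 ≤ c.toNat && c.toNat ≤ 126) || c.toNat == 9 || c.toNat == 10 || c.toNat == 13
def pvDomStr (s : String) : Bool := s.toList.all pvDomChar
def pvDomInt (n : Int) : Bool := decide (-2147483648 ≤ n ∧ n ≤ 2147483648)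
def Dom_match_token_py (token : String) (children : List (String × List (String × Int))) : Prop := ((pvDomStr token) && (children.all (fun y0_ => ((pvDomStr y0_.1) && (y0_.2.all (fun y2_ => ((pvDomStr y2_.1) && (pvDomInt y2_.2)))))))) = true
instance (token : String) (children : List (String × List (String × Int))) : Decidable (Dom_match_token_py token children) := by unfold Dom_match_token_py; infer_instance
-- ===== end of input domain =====

-- B fuses A's two scans into one loop with an early return on the first exact match (objective: simpler).

-- ===== PORT A =====
-- A: first scan for an exact case-insensitive match, then a second scan collecting
-- prefix matchesL that are long enough; unique prefix match or None.
def match_token_py (token : String) (children : List (String × List (String × Int))) : Option String :=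
  let token_lower := PySem.Str.lower token
  match children.find? (fun kv => PySem.Str.lower kv.1 == token_lower) with
  | some kv => some kv.1
  | none =>
    let matchesL := children.foldl (fun ms kv =>
      let min_prefix := (PySem.Dict.mk kv.2).getD "min_prefix" ((PySem.Str.len kv.1 : Int))
      if ((PySem.Str.len token_lower : Int) ≥ min_prefix) &&
          PySem.Str.startswith (PySem.Str.lower kv.1) token_lower
      then ms ++ [kv.1] else ms) []
    if matchesL.length = 1 then matchesL.head? else none

-- ===== PORT B =====
-- B's single loop: early return on exact match, otherwise accumulate prefix matchesL.
def matchTokenAltLoop (token_lower : String) (cs : List (String × List (String × Int)))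
    (matchesL : List String) : Option String :=
  match cs with
  | [] => if matchesL.length = 1 then matchesL.head? else none
  | (name, node_data) :: rest =>
    if PySem.Str.lower name == token_lower then some name
    else if ((PySem.Str.len token_lower : Int) ≥
              (PySem.Dict.mk node_data).getD "min_prefix" ((PySem.Str.len name : Int))) &&
            PySem.Str.startswith (PySem.Str.lower name) token_lower
    then matchTokenAltLoop token_lower rest (matchesL ++ [name])
    else matchTokenAltLoop token_lower rest matchesL

def match_token_py_alt (token : String) (children : List (String × List (String × Int))) : Option String :=
  matchTokenAltLoop (PySem.Str.lower token) children []

-- ===== PRECONDITION & SPEC =====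
def Spec_match_token_py (token : String) (children : List (String × List (String × Int))) (out : Option String) : Prop := out = match_token_py_alt token children
instance (token : String) (children : List (String × List (String × Int))) (out : Option String) : Decidable (Spec_match_token_py token children out) := by unfold Spec_match_token_py; infer_instance

-- ===== CLAIM (what is proved, stated in full; the proofs are below) =====
def Claim_equal_match_token_py : Prop := ∀ (token : String) (children : List (String × List (String × Int))), Dom_match_token_py token children → Spec_match_token_py token children (match_token_py token children)

-- ===== LEMMAS AND PROOFS =====

-- B's fused loop equals A's two-scan shape, for any accumulator.
theorem matchTokenAltLoop_eq (tl : String) :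
    ∀ (cs : List (String × List (String × Int))) (acc : List String),
    matchTokenAltLoop tl cs acc =
      match cs.find? (fun kv => PySem.Str.lower kv.1 == tl) with
      | some kv => some kv.1
      | none =>
        let matchesL := cs.foldl (fun ms kv =>
          let min_prefix := (PySem.Dict.mk kv.2).getD "min_prefix" ((PySem.Str.len kv.1 : Int))
          if ((PySem.Str.len tl : Int) ≥ min_prefix) &&
              PySem.Str.startswith (PySem.Str.lower kv.1) tl
          then ms ++ [kv.1] else ms) acc
        if matchesL.length = 1 then matchesL.head? else none := by
  intro cs
  induction cs with
  | nil => intro acc; simp [matchTokenAltLoop]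
  | cons kv rest ih =>
    intro acc
    obtain ⟨name, node_data⟩ := kv
    by_cases hex : (PySem.Str.lower name == tl) = true
    · simp [matchTokenAltLoop, List.find?, hex]
    · rw [Bool.not_eq_true] at hex
      by_cases hc : (((PySem.Str.len tl : Int) ≥
            (PySem.Dict.mk node_data).getD "min_prefix" ((PySem.Str.len name : Int))) &&
            PySem.Str.startswith (PySem.Str.lower name) tl) = true
      · simp only [matchTokenAltLoop, hex, hc, List.find?, List.foldl_cons,
          Bool.false_eq_true, if_false, if_true]
        rw [ih]
      · rw [Bool.not_eq_true] at hc
        simp only [matchTokenAltLoop, hex, hc, List.find?, List.foldl_cons,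
          Bool.false_eq_true, if_false]
        rw [ih]

-- ===== VERDICT (by name: the statement is the Claim_ definition above) =====
theorem match_token_py_spec : Claim_equal_match_token_py := by
  intro token children _
  unfold Spec_match_token_py match_token_py match_token_py_alt
  rw [matchTokenAltLoop_eq]
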